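-- pv_equiv track=rewrite | github.com/tamim/codinginterviewbook | hotel_booking/solution.py | hotel
-- ===== SOURCE A (Python) =====
-- def hotel(arrive, depart, K):
--     events = [(t, 1) for t in arrive] + [(t, 0) for t in depart]
--     events.sort()
--
--     count = 0
--
--     for event in events:
--         if event[1] == 1:
--             count += 1
--         else:
--             count -= 1
--
--         if count > K:
--             return 0
--
--     return 1
-- ===== SOURCE B (Python) =====
-- def hotel(arrive, depart, K):
--     sa = sorted(arrive)
--     sd = sorted(depart)
--     j = 0
--     count = 0
--     for a in sa:
--         while j < len(sd) and sd[j] <= a: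
--             count -= 1
--             j += 1
--         count += 1
--         if count > K:
--             return 0
--     return 1
-- ===== Notes on version B (the rewrite author's own statement) =====
-- stated objective: alternative
-- what changed: Instead of tagging all times, concatenating and sorting one combined (time, tag) event list and scanning it, B sorts the two plain int lists separately and merges them with a two-pointer sweep (an index over sorted departures consumed per arrival).
-- outside the precondition, e.g. on hotel([], [0], -2): A returns 0, B returns 1; on hotel([5], [0, 0, 0], -2): A returns 0, B returns 1
import Mathlib
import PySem

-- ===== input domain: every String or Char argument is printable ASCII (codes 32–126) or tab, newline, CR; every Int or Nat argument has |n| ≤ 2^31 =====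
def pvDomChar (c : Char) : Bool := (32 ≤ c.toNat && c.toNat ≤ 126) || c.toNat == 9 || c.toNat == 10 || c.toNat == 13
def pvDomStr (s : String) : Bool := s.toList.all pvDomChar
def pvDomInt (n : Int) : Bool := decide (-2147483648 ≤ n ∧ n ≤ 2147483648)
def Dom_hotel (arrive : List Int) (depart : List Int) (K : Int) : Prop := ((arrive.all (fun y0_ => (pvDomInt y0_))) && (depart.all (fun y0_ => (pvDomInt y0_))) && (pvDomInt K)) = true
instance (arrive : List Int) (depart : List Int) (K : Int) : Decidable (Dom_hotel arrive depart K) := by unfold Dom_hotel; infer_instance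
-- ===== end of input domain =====

-- B replaces A's build-tag-and-sort-one-combined-event-list scan by sorting arrivals and departures
-- separately and merging them with a two-pointer sweep (objective: alternative decomposition).

-- ===== PORT A =====
-- the 'for event in events' loop with its early 'return 0'
def hotelLoopA : List (Int × Int) → Int → Int → Int
  | [], _, _ => 1
  | e :: rest, count, K =>
    let c := if e.2 == 1 then count + 1 else count - 1
    if c > K then 0 else hotelLoopA rest c K

def hotel (arrive : List Int) (depart : List Int) (K : Int) : Int :=
  let events := arrive.map (fun t => (t, 1)) ++ depart.map (fun t => (t, 0))
  let events := PySem.List.sorted2 events Prod.fst Prod.snd   -- events.sort(): tuples compare lexicographically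
  hotelLoopA events 0 K

-- ===== PORT B =====
-- the inner 'while j < len(sd) and sd[j] <= a' loop
def hotelConsumeB (sd : List Int) (a : Int) (j : Nat) (count : Int) : Nat × Int :=
  if h : j < sd.length then
    if sd[j] ≤ a then hotelConsumeB sd a (j + 1) (count - 1)
    else (j, count)
  else (j, count)
termination_by sd.length - j

-- the 'for a in sa' loop with its early 'return 0'
def hotelLoopB : List Int → List Int → Nat → Int → Int → Int
  | [], _, _, _, _ => 1
  | a :: as, sd, j, count, K =>
    let p := hotelConsumeB sd a j count
    let c := p.2 + 1
    if c > K then 0 else hotelLoopB as sd p.1 c K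

def hotel_alt (arrive : List Int) (depart : List Int) (K : Int) : Int :=
  let sa := PySem.List.sorted arrive (fun x => x)
  let sd := PySem.List.sorted depart (fun x => x)
  hotelLoopB sa sd 0 0 K

-- ===== PRECONDITION & SPEC =====
-- Pre_ excludes K < 0 (a nonsensical negative room capacity): count may exceed such a K already
-- while processing a run of departure events, where A's mid-scan early return is an artefact of its
-- combined event list and neither A's nor B's value is the specified one.
def Pre_hotel (arrive : List Int) (depart : List Int) (K : Int) : Prop := 0 ≤ K
instance (arrive : List Int) (depart : List Int) (K : Int) : Decidable (Pre_hotel arrive depart K) := by unfold Pre_hotel; infer_instance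

def pvWitness_hotel : List Int × List Int × Int := ([1, 3], [2, 4], 1)

def Spec_hotel (arrive : List Int) (depart : List Int) (K : Int) (out : Int) : Prop := out = hotel_alt arrive depart K
instance (arrive : List Int) (depart : List Int) (K : Int) (out : Int) : Decidable (Spec_hotel arrive depart K out) := by unfold Spec_hotel; infer_instance

-- ===== CLAIM (what is proved, stated in full; the proofs are below) =====
def Claim_equal_hotel : Prop := ∀ (arrive : List Int) (depart : List Int) (K : Int), Dom_hotel arrive depart K → Pre_hotel arrive depart K → Spec_hotel arrive depart K (hotel arrive depart K)

-- ===== LEMMAS AND PROOFS =====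

-- Python's lexicographic ≤ on the (time, tag) event pairs
def LexLe (p q : Int × Int) : Prop := p.1 < q.1 ∨ (p.1 = q.1 ∧ p.2 ≤ q.2)

-- the strict 'before' test sorted2 Prod.fst Prod.snd uses
def lexB (p q : Int × Int) : Bool :=
  decide (p.1 < q.1) || (!decide (q.1 < p.1) && decide (p.2 < q.2))

-- the sorted merge of sorted arrivals and departures, departures first on ties
def mergeED : List Int → List Int → List (Int × Int)
  | [], sd => sd.map (fun t => (t, 0))
  | a :: as, sd =>
    (sd.takeWhile (fun d => d ≤ a)).map (fun t => (t, 0)) ++ (a, 1) :: mergeED as (sd.dropWhile (fun d => d ≤ a))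

theorem lexB_true_iff (p q : Int × Int) : lexB p q = true ↔ (p.1 < q.1 ∨ (p.1 = q.1 ∧ p.2 < q.2)) := by
  simp [lexB]; omega

theorem ins_pairwise (x : Int × Int) (ys : List (Int × Int)) (h : ys.Pairwise LexLe) :
    (PySem.List.insertBy lexB x ys).Pairwise LexLe := by
  induction ys with
  | nil => simp [PySem.List.insertBy, List.pairwise_singleton]
  | cons y ys ih =>
    rw [List.pairwise_cons] at h
    by_cases hb : lexB x y = true
    · have hxy : LexLe x y := by
        rw [lexB_true_iff] at hb; unfold LexLe; omega
      have : (x :: y :: ys).Pairwise LexLe := by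
        rw [List.pairwise_cons]
        refine ⟨?_, by rw [List.pairwise_cons]; exact h⟩
        intro z hz
        rcases List.mem_cons.mp hz with rfl | hz
        · exact hxy
        · have := h.1 z hz; unfold LexLe at *; omega
      simpa [PySem.List.insertBy, hb] using this
    · have hyx : LexLe y x := by
        have : ¬ (x.1 < y.1 ∨ (x.1 = y.1 ∧ x.2 < y.2)) := by
          intro hc; exact hb ((lexB_true_iff x y).mpr hc)
        unfold LexLe; omega
      have : (y :: PySem.List.insertBy lexB x ys).Pairwise LexLe := by
        rw [List.pairwise_cons]
        refine ⟨?_, ih h.2⟩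
        intro z hz
        rcases (PySem.List.mem_insertBy lexB x z ys).mp hz with rfl | hz
        · exact hyx
        · exact h.1 z hz
      simpa [PySem.List.insertBy, hb] using this

theorem foldl_ins_pairwise (xs : List (Int × Int)) (acc : List (Int × Int))
    (h : acc.Pairwise LexLe) :
    (xs.foldl (fun acc x => PySem.List.insertBy lexB x acc) acc).Pairwise LexLe := by
  induction xs generalizing acc with
  | nil => exact h
  | cons x xs ih => exact ih _ (ins_pairwise x acc h)

theorem sorted2_eq_lexB (xs : List (Int × Int)) :
    PySem.List.sorted2 xs Prod.fst Prod.snd = xs.foldl (fun acc x => PySem.List.insertBy lexB x acc) [] := by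
  rfl

theorem sorted2_pairwise_lex (xs : List (Int × Int)) :
    (PySem.List.sorted2 xs Prod.fst Prod.snd).Pairwise LexLe := by
  rw [sorted2_eq_lexB]
  exact foldl_ins_pairwise xs [] List.Pairwise.nil

theorem sorted2_eq_of_perm_of_pairwise (xs ys : List (Int × Int))
    (hp : ys.Perm xs) (hs : ys.Pairwise LexLe) :
    PySem.List.sorted2 xs Prod.fst Prod.snd = ys := by
  apply List.eq_of_perm_of_sorted (le := LexLe)
  · intro a b _ _ h1 h2
    have := h1; have := h2
    unfold LexLe at *
    have : a.1 = b.1 ∧ a.2 = b.2 := by omega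
    exact Prod.ext this.1 this.2
  · exact sorted2_pairwise_lex xs
  · exact hs
  · exact (PySem.List.sorted2_perm xs Prod.fst Prod.snd false).trans hp.symm

theorem mergeED_perm (sa sd : List Int) :
    (mergeED sa sd).Perm (sa.map (fun t => (t, 1)) ++ sd.map (fun t => (t, 0))) := by
  induction sa generalizing sd with
  | nil => simp [mergeED]
  | cons a as ih =>
    have hsd : sd.takeWhile (fun d => d ≤ a) ++ sd.dropWhile (fun d => d ≤ a) = sd :=
      List.takeWhile_append_dropWhile
    have h1 : (mergeED (a :: as) sd).Perm
        ((a, 1) :: ((sd.takeWhile (fun d => d ≤ a)).map (fun t => (t, 0)) ++ mergeED as (sd.dropWhile (fun d => d ≤ a)))) :=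
      List.perm_middle
    have h2 : ((sd.takeWhile (fun d => d ≤ a)).map (fun t => (t, 0)) ++ mergeED as (sd.dropWhile (fun d => d ≤ a))).Perm
        (as.map (fun t => (t, 1)) ++ ((sd.takeWhile (fun d => d ≤ a)).map (fun t => (t, 0)) ++ (sd.dropWhile (fun d => d ≤ a)).map (fun t => (t, 0)))) := by
      refine ((ih _).append_left _).trans ?_
      rw [← List.append_assoc, ← List.append_assoc]
      exact List.perm_append_comm.append_right _
    have h3 : (mergeED (a :: as) sd).Perm
        ((a, 1) :: (as.map (fun t => (t, 1)) ++ sd.map (fun t => (t, 0)))) := by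
      refine h1.trans (h2.cons _) |>.trans ?_
      rw [← List.map_append, hsd]
    exact h3.trans (List.perm_middle.symm.trans (by simp))

theorem dropWhile_gt (a : Int) (sd : List Int) (h : sd.Pairwise (· ≤ ·)) :
    ∀ d ∈ sd.dropWhile (fun d => d ≤ a), a < d := by
  induction sd with
  | nil => simp
  | cons x xs ih =>
    rw [List.pairwise_cons] at h
    by_cases hx : x ≤ a
    · simpa [List.dropWhile_cons, hx] using ih h.2
    · intro d hd
      rw [List.dropWhile_cons] at hd
      simp only [decide_eq_true_eq] at hd
      rw [if_neg hx] at hd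
      rcases List.mem_cons.mp hd with rfl | hd
      · omega
      · have := h.1 d hd; omega

theorem mem_mergeED (sa sd : List Int) (x : Int × Int) (hx : x ∈ mergeED sa sd) :
    (x.2 = 1 ∧ x.1 ∈ sa) ∨ (x.2 = 0 ∧ x.1 ∈ sd) := by
  have := (mergeED_perm sa sd).mem_iff.mp hx
  rw [List.mem_append] at this
  rcases this with h | h <;> rcases List.mem_map.mp h with ⟨t, ht, rfl⟩
  · exact Or.inl ⟨rfl, ht⟩
  · exact Or.inr ⟨rfl, ht⟩

theorem mergeED_pairwise (sa sd : List Int)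
    (ha : sa.Pairwise (· ≤ ·)) (hd : sd.Pairwise (· ≤ ·)) :
    (mergeED sa sd).Pairwise LexLe := by
  induction sa generalizing sd with
  | nil =>
    unfold mergeED
    rw [List.pairwise_map]
    exact hd.imp (fun h => by unfold LexLe; omega)
  | cons a as ih =>
    rw [List.pairwise_cons] at ha
    have htw : ∀ t ∈ sd.takeWhile (fun d => d ≤ a), t ≤ a := by
      intro t ht
      have := List.mem_takeWhile_imp ht
      simpa using this
    have hdw := dropWhile_gt a sd hd
    have hdwp : (sd.dropWhile (fun d => d ≤ a)).Pairwise (· ≤ ·) :=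
      List.Pairwise.sublist (List.dropWhile_sublist _) hd
    have htwp : (sd.takeWhile (fun d => d ≤ a)).Pairwise (· ≤ ·) :=
      List.Pairwise.sublist (List.takeWhile_sublist _) hd
    have hrec := ih (sd.dropWhile (fun d => d ≤ a)) ha.2 hdwp
    unfold mergeED
    rw [List.pairwise_append]
    refine ⟨by rw [List.pairwise_map]; exact htwp.imp (fun h => by unfold LexLe; omega), ?_, ?_⟩
    · rw [List.pairwise_cons]
      refine ⟨?_, hrec⟩
      intro y hy
      rcases mem_mergeED _ _ y hy with ⟨h2, h1⟩ | ⟨h2, h1⟩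
      · have := ha.1 y.1 h1; unfold LexLe; omega
      · have := hdw y.1 h1; unfold LexLe; omega
    · intro x hx y hy
      rcases List.mem_map.mp hx with ⟨t, ht, rfl⟩
      have hta := htw t ht
      rcases List.mem_cons.mp hy with rfl | hy
      · unfold LexLe; simp; omega
      · rcases mem_mergeED _ _ y hy with ⟨h2, h1⟩ | ⟨h2, h1⟩
        · have := ha.1 y.1 h1; unfold LexLe; simp; omega
        · have := hdw y.1 h1; unfold LexLe; simp; omega

theorem consumeB_spec (sd : List Int) (a : Int) :
    ∀ (l : List Int) (j : Nat) (count : Int), j ≤ sd.length → sd.drop j = l →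
      hotelConsumeB sd a j count =
        (j + (l.takeWhile (fun d => d ≤ a)).length, count - (l.takeWhile (fun d => d ≤ a)).length) := by
  intro l
  induction l with
  | nil =>
    intro j count hj hdrop
    have hlen : sd.length ≤ j := by
      have := congrArg List.length hdrop; simp at this; omega
    rw [hotelConsumeB, dif_neg (by omega)]
    simp
  | cons x xs ih =>
    intro j count hj hdrop
    have hjlt : j < sd.length := by
      have := congrArg List.length hdrop; simp at this; omega
    have hget : sd[j] = x := by
      have : (sd.drop j)[0]'(by rw [hdrop]; simp) = x := by simp [hdrop]
      simpa using this
    have hxs : sd.drop (j + 1) = xs := by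
      rw [← List.drop_drop, hdrop, List.drop_one]
      rfl
    rw [hotelConsumeB, dif_pos hjlt, hget]
    by_cases hx : x ≤ a
    · rw [if_pos hx, ih (j + 1) (count - 1) (by omega) hxs]
      simp [List.takeWhile_cons, hx]
      constructor
      · omega
      · push_cast; ring
    · rw [if_neg hx]
      simp [List.takeWhile_cons, hx]

theorem loopA_deps (ds : List Int) :
    ∀ (rest : List (Int × Int)) (count K : Int), count ≤ K →
      hotelLoopA (ds.map (fun t => (t, 0)) ++ rest) count K = hotelLoopA rest (count - ds.length) K := by
  induction ds with
  | nil => intro rest count K _; simp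
  | cons d ds ih =>
    intro rest count K hcK
    simp only [List.map_cons, List.cons_append]
    rw [hotelLoopA]
    simp only [show (((0:Int)) == (1:Int)) = false from rfl, Bool.false_eq_true, if_false]
    rw [if_neg (by omega)]
    rw [ih rest (count - 1) K (by omega)]
    congr 1
    simp
    omega

theorem loop_merge (sa : List Int) :
    ∀ (sd : List Int) (j : Nat) (count K : Int), count ≤ K → j ≤ sd.length →
      hotelLoopA (mergeED sa (sd.drop j)) count K = hotelLoopB sa sd j count K := by
  induction sa with
  | nil =>
    intro sd j count K hcK hj
    unfold mergeED hotelLoopB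
    rw [← List.append_nil ((sd.drop j).map (fun t => (t, 0)))]
    rw [loopA_deps _ _ _ _ hcK]
    rfl
  | cons a as ih =>
    intro sd j count K hcK hj
    have hsplit := consumeB_spec sd a (sd.drop j) j count hj rfl
    set l := sd.drop j with hl
    set k := (l.takeWhile (fun d => d ≤ a)).length with hk
    have hklen : k ≤ l.length := by rw [hk]; exact (List.takeWhile_sublist _).length_le
    have hldrop : sd.drop (j + k) = l.dropWhile (fun d => d ≤ a) := by
      rw [← List.drop_drop, ← hl]
      conv_lhs => rw [← List.takeWhile_append_dropWhile (p := fun d => d ≤ a) (l := l)]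
      rw [List.drop_left' hk.symm]
    have hjk : j + k ≤ sd.length := by
      have : l.length = sd.length - j := by rw [hl]; simp
      omega
    unfold mergeED
    rw [loopA_deps _ _ _ _ hcK]
    rw [hotelLoopA]
    simp only [show ((a, (1:Int)).2 == 1) = true from rfl, if_true]
    rw [hotelLoopB]
    simp only [hsplit, ← hk]
    by_cases hgt : count - k + 1 > K
    · rw [if_pos hgt, if_pos hgt]
    · rw [if_neg hgt, if_neg hgt]
      rw [← hldrop] at *
      exact ih sd (j + k) (count - k + 1) K (by omega) hjk

theorem sorted_eq_merge (arrive depart : List Int) :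
    PySem.List.sorted2 (arrive.map (fun t => (t, 1)) ++ depart.map (fun t => (t, 0))) Prod.fst Prod.snd =
      mergeED (PySem.List.sorted arrive (fun x => x)) (PySem.List.sorted depart (fun x => x)) := by
  apply sorted2_eq_of_perm_of_pairwise
  · exact (mergeED_perm _ _).trans
      (List.Perm.append ((PySem.List.sorted_perm arrive _ false).map _) ((PySem.List.sorted_perm depart _ false).map _))
  · exact mergeED_pairwise _ _ (PySem.List.sorted_pairwise arrive (fun x => x)) (PySem.List.sorted_pairwise depart (fun x => x))

-- ===== VERDICT (by name: the statement is the Claim_ definition above) =====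
theorem hotel_spec : Claim_equal_hotel := by
  intro arrive depart K _ hK
  unfold Spec_hotel hotel hotel_alt
  simp only []
  rw [sorted_eq_merge]
  have := loop_merge (PySem.List.sorted arrive (fun x => x)) (PySem.List.sorted depart (fun x => x)) 0 0 K hK (by omega)
  simpa using this
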